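-- pv_equiv track=rewrite | github.com/DeveloperAcademy-POSTECH/Algorithm | TEAM B2 (Season 2)/Week 2/Moana/[스택큐_기능개발].py | solution
-- ===== SOURCE A (Python) =====
-- def solution(progresses, speeds):
--     answer = []
--     count = 0
--     work = 0
--
--     while len(progresses) > 0:
--         if progresses[0] + work * speeds[0] >= 100:
--             progresses.pop(0)
--             speeds.pop(0)
--             count += 1
--         else:
--             if count > 0:
--                 answer.append(count)
--                 count = 0
--             work += 1
--     answer.append(count)
--     return answer
-- ===== SOURCE B (Python) =====
-- def solution(progresses, speeds):
--     answer = []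
--     cur = 0   # running release day (clamped at 0)
--     cnt = 0
--     for p, s in zip(progresses, speeds):
--         d = -((p - 100) // s)  # ceil((100 - p) / s)
--         if d < 0:
--             d = 0
--         if cnt > 0 and d > cur:
--             answer.append(cnt)
--             cnt = 0
--         if d > cur:
--             cur = d
--         cnt += 1
--     answer.append(cnt)
--     return answer
-- ===== Notes on version B (the rewrite author's own statement) =====
-- stated objective: faster
-- what changed: Intended as faster (timing: A timed out at n=16 where B returned; no ratio measurable): B replaces A's day-by-day simulation with destructive pop(0) by a single pass over zip(progresses, speeds) that computes each task's finish day with ceiling division and batches by a running maximum day; B does not mutate its arguments (A pops them empty).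
-- outside the precondition, e.g. on solution([150], [0]): A returns [1], B raises ZeroDivisionError; on solution([150], [-1]): A returns [1], B returns [1]
import Mathlib
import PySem

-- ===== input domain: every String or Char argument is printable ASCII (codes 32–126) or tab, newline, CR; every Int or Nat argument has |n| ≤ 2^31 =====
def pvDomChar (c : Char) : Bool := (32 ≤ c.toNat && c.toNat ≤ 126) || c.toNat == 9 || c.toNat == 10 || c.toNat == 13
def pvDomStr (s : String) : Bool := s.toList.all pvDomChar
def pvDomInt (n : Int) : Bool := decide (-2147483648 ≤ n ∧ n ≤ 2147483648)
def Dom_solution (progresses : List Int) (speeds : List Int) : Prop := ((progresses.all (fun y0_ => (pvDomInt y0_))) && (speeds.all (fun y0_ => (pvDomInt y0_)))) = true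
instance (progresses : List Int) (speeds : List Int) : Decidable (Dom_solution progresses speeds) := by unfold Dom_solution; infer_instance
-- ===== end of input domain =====

-- B replaces A's day-by-day simulation (which also pops both argument lists empty — the
-- equivalence is about the return value only) by a one-pass batching over per-task finish
-- days computed with ceiling division; intended as faster (a timing run could not
-- measure a ratio: A timed out at n=16 where B returned).


-- ===== PORT A =====
-- A's while-loop: pop the front task when it is done at day `work`, else flush the batch
-- counter and advance one day.  The two extra exits are totality guards only: with
-- progresses nonempty and speeds empty Python raises IndexError, and with a pending front
-- task of speed ≤ 0 Python loops forever — both outside Pre_solution.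
def solutionLoop (progresses : List Int) (speeds : List Int) (work count : Int)
    (answer : List Int) : List Int :=
  match progresses, speeds with
  | [], _ => answer ++ [count]
  | p :: ps, s :: ss =>
    if 100 ≤ p + work * s then
      solutionLoop ps ss work (count + 1) answer
    else if 1 ≤ s then
      solutionLoop (p :: ps) (s :: ss) (work + 1) 0
        (if 0 < count then answer ++ [count] else answer)
    else answer  -- totality guard: Python A diverges here (excluded by Pre_solution)
  | _ :: _, [] => answer  -- Python A raises IndexError here (excluded by Pre_solution)
  termination_by (progresses.length, (100 - (progresses.headD 0) - work * (speeds.headD 0)).toNat)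
  decreasing_by
  · exact Prod.Lex.left _ _ (by simp)
  · refine Prod.Lex.right _ ?_
    simp only [List.headD_cons]
    rename_i h1 h2
    have : (0:Int) < 100 - p - work * s := by omega
    have : 100 - p - (work + 1) * s < 100 - p - work * s := by nlinarith
    omega

def solution (progresses : List Int) (speeds : List Int) : List Int :=
  solutionLoop progresses speeds 0 0 []

-- ===== PORT B =====
def solutionAltLoop (tasks : List (Int × Int)) (cur cnt : Int) (answer : List Int) :
    List Int :=
  match tasks with
  | [] => answer ++ [cnt]
  | (p, s) :: rest =>
    let d0 := -(PySem.Int.floordiv (p - 100) s)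
    let d := if d0 < 0 then 0 else d0
    if 0 < cnt ∧ cur < d then
      solutionAltLoop rest (if cur < d then d else cur) 1 (answer ++ [cnt])
    else
      solutionAltLoop rest (if cur < d then d else cur) (cnt + 1) answer

def solution_alt (progresses : List Int) (speeds : List Int) : List Int :=
  solutionAltLoop (progresses.zip speeds) 0 0 []

-- ===== PRECONDITION & SPEC =====
-- Pre_ excludes inputs where Python A raises IndexError (more tasks than speeds) or loops
-- forever (a not-yet-finished task with speed ≤ 0), and inputs with a nonpositive speed on
-- an already-finished task, where A returns but B's ceiling division raises or is junk.
def Pre_solution (progresses : List Int) (speeds : List Int) : Prop :=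
  progresses.length ≤ speeds.length ∧ ∀ s ∈ speeds.take progresses.length, 1 ≤ s
instance (progresses : List Int) (speeds : List Int) : Decidable (Pre_solution progresses speeds) := by unfold Pre_solution; infer_instance

def pvWitness_solution : List Int × List Int := ([93, 30, 55], [1, 30, 5])

def Spec_solution (progresses : List Int) (speeds : List Int) (out : List Int) : Prop := out = solution_alt progresses speeds
instance (progresses : List Int) (speeds : List Int) (out : List Int) : Decidable (Spec_solution progresses speeds out) := by unfold Spec_solution; infer_instance

-- ===== CLAIM (what is proved, stated in full; the proofs are below) =====
def Claim_equal_solution : Prop := ∀ (progresses : List Int) (speeds : List Int), Dom_solution progresses speeds → Pre_solution progresses speeds → Spec_solution progresses speeds (solution progresses speeds)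

-- ===== LEMMAS AND PROOFS =====

-- For speed s ≥ 1, `work ≥ ceil((100-p)/s)` is exactly A's pop condition `p + work*s ≥ 100`.
lemma ceil_le_iff (p s work : Int) (hs : 1 ≤ s) :
    -(PySem.Int.floordiv (p - 100) s) ≤ work ↔ 100 ≤ p + work * s := by
  set q : Int := -(PySem.Int.floordiv (p - 100) s) with hq
  have hb := (PySem.Int.neg_floordiv_neg_eq_iff_of_pos (a := 100 - p) (b := s) (q := q)
      (by omega)).mp (by rw [hq, show -(100 - p) = p - 100 by ring])
  obtain ⟨h1, h2⟩ := hb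
  constructor
  · intro h
    have := mul_le_mul_of_nonneg_right h (by omega : (0:Int) ≤ s)
    nlinarith
  · intro h
    have hlt : (q - 1) * s < work * s := by nlinarith
    have := lt_of_mul_lt_mul_right hlt (by omega : (0:Int) ≤ s)
    omega

-- Unrolling A's inner day-advance: starting from day `work`, the front task (speed ≥ 1)
-- pops at day max(work, d); the batch counter is flushed iff the day advances and count > 0.
lemma solutionLoop_step (n : Nat) : ∀ (p s : Int) (ps ss : List Int) (work count : Int)
    (ans : List Int), 1 ≤ s → ((-(PySem.Int.floordiv (p - 100) s)) - work).toNat = n →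
    solutionLoop (p :: ps) (s :: ss) work count ans =
      if -(PySem.Int.floordiv (p - 100) s) ≤ work then
        solutionLoop ps ss work (count + 1) ans
      else
        solutionLoop ps ss (-(PySem.Int.floordiv (p - 100) s)) 1
          (if 0 < count then ans ++ [count] else ans) := by
  induction n with
  | zero =>
    intro p s ps ss work count ans hs hn
    set d : Int := -(PySem.Int.floordiv (p - 100) s) with hd
    have hle : d ≤ work := by omega
    rw [solutionLoop]
    rw [if_pos ((ceil_le_iff p s work hs).mp hle), if_pos hle]
  | succ n ih =>
    intro p s ps ss work count ans hs hn
    set d : Int := -(PySem.Int.floordiv (p - 100) s) with hd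
    have hgt : work < d := by omega
    rw [solutionLoop]
    rw [if_neg (by intro h; exact absurd ((ceil_le_iff p s work hs).mpr h) (by omega)),
        if_pos hs]
    rw [ih p s ps ss (work + 1) 0 _ hs (by omega)]
    by_cases hle : d ≤ work + 1
    · have : d = work + 1 := by omega
      rw [if_pos hle, this]
      norm_num
    · rw [if_neg hle, if_neg (by omega), if_neg hgt.not_ge]

-- The two loops agree from any state with day ≥ 0 and count ≥ 0 (Pre_ on the remaining lists).
lemma loops_eq : ∀ (ps ss : List Int) (work count : Int) (ans : List Int),
    0 ≤ work → 0 ≤ count → ps.length ≤ ss.length →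
    (∀ s ∈ ss.take ps.length, 1 ≤ s) →
    solutionLoop ps ss work count ans = solutionAltLoop (ps.zip ss) work count ans := by
  intro ps
  induction ps with
  | nil =>
    intro ss work count ans _ _ _ _
    rw [solutionLoop, List.zip_nil_left, solutionAltLoop]
  | cons p ps ih =>
    intro ss work count ans hw hc hlen hsp
    match ss with
    | [] => simp at hlen
    | s :: ss =>
      have hs : 1 ≤ s := hsp s (by simp)
      rw [solutionLoop_step (((-(PySem.Int.floordiv (p - 100) s)) - work).toNat)
            p s ps ss work count ans hs rfl]
      rw [List.zip_cons_cons]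
      simp only [solutionAltLoop]
      set d0 : Int := -(PySem.Int.floordiv (p - 100) s) with hd0
      set D : Int := if d0 < 0 then 0 else d0 with hD
      have hlen' : ps.length ≤ ss.length := by simpa using hlen
      have hsp' : ∀ x ∈ ss.take ps.length, 1 ≤ x := by
        intro x hx
        have ht : (s :: ss).take (p :: ps).length = s :: ss.take ps.length := by
          simp [List.take_succ_cons]
        exact hsp x (by rw [ht]; exact List.mem_cons_of_mem s hx)
      by_cases hle : d0 ≤ work
      · have hDw : D ≤ work := by rw [hD]; split <;> omega
        rw [if_pos hle, if_neg (by rintro ⟨-, h⟩; omega), if_neg (by omega)]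
        exact ih ss work (count + 1) ans hw (by omega) hlen' hsp'
      · have hDd : D = d0 := by rw [hD, if_neg (by omega)]
        rw [if_neg hle, hDd]
        by_cases hcnt : 0 < count
        · rw [if_pos hcnt, if_pos ⟨hcnt, by omega⟩, if_pos (by omega)]
          exact ih ss d0 1 (ans ++ [count]) (by omega) (by omega) hlen' hsp'
        · have hc0 : count = 0 := by omega
          rw [if_neg hcnt, if_neg (by rintro ⟨h, -⟩; exact hcnt h), if_pos (by omega), hc0]
          exact ih ss d0 (0 + 1) ans (by omega) (by omega) hlen' hsp'

-- ===== VERDICT (by name: the statement is the Claim_ definition above) =====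
theorem solution_spec : Claim_equal_solution := by
  intro ps ss _ hpre
  unfold Spec_solution solution solution_alt
  exact loops_eq ps ss 0 0 [] le_rfl le_rfl hpre.1 hpre.2
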